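-- pv_equiv track=rewrite | github.com/hk-bae/coding-test | baekjoon/binary_search_12865.py | solution
-- ===== SOURCE A (Python) =====
-- from bisect import bisect_left
-- from bisect import bisect_right
--
-- def solution(n,h,o1,o2) :
--
--     min_value = 1e9
--     cnt = 0
--     length = n // 2
--     if n%2 == 1 : length += 1 # 석순의 총 개수
--
--     for i in range(1,h+1): # 개똥벌레가 지나가는 위치 탐색
--         tmp = length - bisect_left(o1,i) + bisect_right(o2,i)
--         if tmp < min_value :
--             min_value = tmp
--             cnt = 1
--         elif tmp == min_value :
--             cnt += 1
--
--
--     result = [min_value,cnt]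
--
--     return result
-- ===== SOURCE B (Python) =====
-- from bisect import bisect_left
-- from bisect import bisect_right
--
-- def _hits(length, o1, o2, i):
--     # obstacles hit when flying at height i
--     return length - bisect_left(o1, i) + bisect_right(o2, i)
--
-- def solution(n, h, o1, o2):
--     # Event-point sweep: the hit count is a step function of the height, changing
--     # only at heights v+1 (v in o1) and v (v in o2); evaluate it once per maximal
--     # constant block instead of once per height, weighting by the block width.
--     length = (n + 1) // 2
--     cuts = {1}
--     for v in o1:
--         if 1 <= v + 1 <= h:
--             cuts.add(v + 1)
--     for v in o2:
--         if 1 <= v <= h: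
--             cuts.add(v)
--     pts = sorted(cuts)
--     best = None
--     cnt = 0
--     for c, nxt in zip(pts, pts[1:] + [h + 1]):
--         val = _hits(length, o1, o2, c)
--         w = nxt - c
--         if best is None or val < best:
--             best, cnt = val, w
--         elif val == best:
--             cnt += w
--     return [best, cnt]
-- ===== Notes on version B (the rewrite author's own statement) =====
-- stated objective: alternative
-- what changed: A evaluates the hit count (two bisects) once per height 1..h and tracks min/count per height; B computes the breakpoints of the piecewise-constant hit-count function (v+1 for stalagmites, v for stalactites), sorts them, and evaluates the count once per maximal constant block, adding the block width to the frequency, so the work no longer grows with h.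
-- outside the precondition, e.g. on solution(4, 0, [1], [2]): A returns [1000000000.0, 0], B returns [2, 0]; on solution(2147483646, 1, [], []): A returns [1000000000.0, 0], B returns [1073741823, 1]
import Mathlib
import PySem

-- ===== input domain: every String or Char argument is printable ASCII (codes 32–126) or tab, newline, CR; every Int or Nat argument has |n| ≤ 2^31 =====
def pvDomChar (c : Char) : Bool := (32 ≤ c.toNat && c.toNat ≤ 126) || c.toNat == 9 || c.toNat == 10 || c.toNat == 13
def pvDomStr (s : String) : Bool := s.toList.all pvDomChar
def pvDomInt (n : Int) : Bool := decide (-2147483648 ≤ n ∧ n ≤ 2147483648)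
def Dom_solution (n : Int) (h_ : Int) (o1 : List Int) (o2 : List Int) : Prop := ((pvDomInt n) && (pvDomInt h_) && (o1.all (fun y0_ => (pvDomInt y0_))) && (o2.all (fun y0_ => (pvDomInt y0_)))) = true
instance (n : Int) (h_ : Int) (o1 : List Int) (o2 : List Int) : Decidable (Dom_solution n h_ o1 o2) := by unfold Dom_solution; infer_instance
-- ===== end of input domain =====

-- B replaces A's per-height scan (a pair of binary searches for every height 1..h) by an
-- event-point sweep: the hit count is a step function of the height, so B evaluates it once
-- per maximal constant block and weights by the block width (objective: alternative/faster on h ≫ n).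

-- ===== PORT A =====
-- A's loop body: update (min_value, cnt) with the hit count tmp of the current height.
def pvStepA (mc : Int × Int) (tmp : Int) : Int × Int :=
  if tmp < mc.1 then (tmp, 1) else if tmp = mc.1 then (mc.1, mc.2 + 1) else mc

-- Python's min_value starts as the float 1e9; under Pre_ every tmp is < 10^9, so the
-- integer sentinel 10^9 is exact (inputs where the sentinel could survive are outside Pre_).
def solution (n : Int) (h_ : Int) (o1 : List Int) (o2 : List Int) : List Int :=
  let len0 : Int := PySem.Int.floordiv n 2
  let length : Int := if PySem.Int.mod n 2 = 1 then len0 + 1 else len0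
  let st :=
    (PySem.List.pyRange 1 (h_ + 1) 1).foldl
      (fun mc i =>
        pvStepA mc (length - (PySem.List.bisectLeft o1 i : Int) + (PySem.List.bisectRight o2 i : Int)))
      (1000000000, 0)
  [st.1, st.2]

-- ===== PORT B =====
-- Source B's helper _hits
def pvHits (length : Int) (o1 o2 : List Int) (i : Int) : Int :=
  length - (PySem.List.bisectLeft o1 i : Int) + (PySem.List.bisectRight o2 i : Int)

-- Source B's loop body over a (cut, next cut) pair; best = none is Python's best = None.
def pvStepB (length : Int) (o1 o2 : List Int) (bc : Option Int × Int) (p : Int × Int) :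
    Option Int × Int :=
  let val := pvHits length o1 o2 p.1
  let w := p.2 - p.1
  match bc.1 with
  | none => (some val, w)
  | some b => if val < b then (some val, w) else if val = b then (some b, bc.2 + w) else bc

def solution_alt (n : Int) (h_ : Int) (o1 : List Int) (o2 : List Int) : List Int :=
  let length : Int := PySem.Int.floordiv (n + 1) 2
  let cuts : PySem.Set Int :=
    o2.foldl (fun s v => if 1 ≤ v ∧ v ≤ h_ then PySem.Set.add s v else s)
      (o1.foldl (fun s v => if 1 ≤ v + 1 ∧ v + 1 ≤ h_ then PySem.Set.add s (v + 1) else s)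
        (PySem.Set.ofList [1]))
  let pts := PySem.List.sorted cuts (fun x => x)
  let st := (pts.zip (pts.drop 1 ++ [h_ + 1])).foldl (pvStepB length o1 o2) (none, 0)
  -- pts always contains 1, so st.1 is some _: Python's best is never None here
  [st.1.getD 0, st.2]

-- ===== PRECONDITION & SPEC =====
-- Pre_ excludes inputs where A's result is not a list of ints: with h ≤ 0 the loop never runs
-- and A returns [1e9, 0] (a float), and with (n+1)//2 + len(o2) ≥ 10^9 the float sentinel 1e9
-- can survive the min into the returned list.
def Pre_solution (n : Int) (h_ : Int) (o1 : List Int) (o2 : List Int) : Prop :=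
  1 ≤ h_ ∧ PySem.Int.floordiv (n + 1) 2 + (o2.length : Int) < 1000000000

instance (n : Int) (h_ : Int) (o1 : List Int) (o2 : List Int) : Decidable (Pre_solution n h_ o1 o2) := by
  unfold Pre_solution; infer_instance

def pvWitness_solution : Int × Int × List Int × List Int := (7, 5, [1, 2], [3])

def Spec_solution (n : Int) (h_ : Int) (o1 : List Int) (o2 : List Int) (out : List Int) : Prop := out = solution_alt n h_ o1 o2
instance (n : Int) (h_ : Int) (o1 : List Int) (o2 : List Int) (out : List Int) : Decidable (Spec_solution n h_ o1 o2 out) := by unfold Spec_solution; infer_instance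

-- ===== CLAIM (what is proved, stated in full; the proofs are below) =====
def Claim_equal_solution : Prop := ∀ (n : Int) (h_ : Int) (o1 : List Int) (o2 : List Int), Dom_solution n h_ o1 o2 → Pre_solution n h_ o1 o2 → Spec_solution n h_ o1 o2 (solution n h_ o1 o2)

-- ===== LEMMAS AND PROOFS =====

-- The heights at which the hit-count step function can change value.
def pvCut (o1 o2 : List Int) (j : Int) : Prop := (∃ v ∈ o1, j = v + 1) ∨ (∃ v ∈ o2, j = v)

-- bisect on an arbitrary (possibly unsorted) list depends on the key only through the
-- comparisons with the list elements.
theorem bisectLeftLoop_congr (xs : List Int) (x y : Int) (h : ∀ v ∈ xs, (v < x ↔ v < y)) :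
    ∀ fuel lo hi, PySem.List.bisectLeftLoop xs x fuel lo hi = PySem.List.bisectLeftLoop xs y fuel lo hi := by
  intro fuel
  induction fuel with
  | zero => intro lo hi; simp [PySem.List.bisectLeftLoop]
  | succ f ih =>
    intro lo hi
    rw [PySem.List.bisectLeftLoop, PySem.List.bisectLeftLoop]
    split
    · rcases hx : xs[(lo + hi) / 2]? with _ | v
      · simp
      · have hv : v ∈ xs := List.mem_of_getElem? hx
        simp only []
        by_cases hlt : v < x
        · rw [if_pos hlt, if_pos ((h v hv).mp hlt)]; exact ih _ _
        · rw [if_neg hlt, if_neg (fun hy => hlt ((h v hv).mpr hy))]; exact ih _ _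
    · rfl

theorem bisectRightLoop_congr (xs : List Int) (x y : Int) (h : ∀ v ∈ xs, (x < v ↔ y < v)) :
    ∀ fuel lo hi, PySem.List.bisectRightLoop xs x fuel lo hi = PySem.List.bisectRightLoop xs y fuel lo hi := by
  intro fuel
  induction fuel with
  | zero => intro lo hi; simp [PySem.List.bisectRightLoop]
  | succ f ih =>
    intro lo hi
    rw [PySem.List.bisectRightLoop, PySem.List.bisectRightLoop]
    split
    · rcases hx : xs[(lo + hi) / 2]? with _ | v
      · simp
      · have hv : v ∈ xs := List.mem_of_getElem? hx
        simp only []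
        by_cases hlt : x < v
        · rw [if_pos hlt, if_pos ((h v hv).mp hlt)]; exact ih _ _
        · rw [if_neg hlt, if_neg (fun hy => hlt ((h v hv).mpr hy))]; exact ih _ _
    · rfl

theorem bisectRightLoop_le (xs : List Int) (x : Int) :
    ∀ fuel lo hi, PySem.List.bisectRightLoop xs x fuel lo hi ≤ max lo hi := by
  intro fuel
  induction fuel with
  | zero => intro lo hi; simp [PySem.List.bisectRightLoop]
  | succ f ih =>
    intro lo hi
    rw [PySem.List.bisectRightLoop]
    split
    · rcases hx : xs[(lo + hi) / 2]? with _ | v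
      · simp
      · simp only []
        split
        · have := ih lo ((lo + hi) / 2); omega
        · have := ih ((lo + hi) / 2 + 1) hi; omega
    · omega

theorem bisectRight_le (xs : List Int) (x : Int) : PySem.List.bisectRight xs x ≤ xs.length := by
  have := bisectRightLoop_le xs x xs.length 0 xs.length
  simpa [PySem.List.bisectRight] using this

-- the hit count is constant on a height interval containing no cut (above its left end)
theorem pvHits_congr (length : Int) (o1 o2 : List Int) (c i : Int) (hci : c ≤ i)
    (hnc : ∀ j, c < j → j ≤ i → ¬ pvCut o1 o2 j) :
    pvHits length o1 o2 i = pvHits length o1 o2 c := by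
  have hbl : PySem.List.bisectLeft o1 i = PySem.List.bisectLeft o1 c := by
    unfold PySem.List.bisectLeft
    apply bisectLeftLoop_congr
    intro v hv
    constructor
    · intro hvi
      by_contra hvc
      exact hnc (v + 1) (by omega) (by omega) (Or.inl ⟨v, hv, rfl⟩)
    · intro hvc; omega
  have hbr : PySem.List.bisectRight o2 i = PySem.List.bisectRight o2 c := by
    unfold PySem.List.bisectRight
    apply bisectRightLoop_congr
    intro v hv
    constructor
    · intro hvi; omega
    · intro hvc
      by_contra hvi
      exact hnc v (by omega) (by omega) (Or.inr ⟨v, hv, rfl⟩)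
  unfold pvHits
  rw [hbl, hbr]

-- folding A's step over a run of equal values
theorem foldl_stepA_eq (l : List Int) (t c : Int) (h : ∀ x ∈ l, x = t) :
    l.foldl pvStepA (t, c) = (t, c + l.length) := by
  induction l generalizing c with
  | nil => simp
  | cons x l ih =>
    have hx : x = t := h x (by simp)
    subst hx
    simp only [List.foldl_cons, pvStepA, lt_irrefl, if_false, if_true]
    rw [ih _ (fun y hy => h y (by simp [hy]))]
    simp
    omega

theorem foldl_stepA_gt (l : List Int) (t m c : Int) (hmt : m < t) (h : ∀ x ∈ l, x = t) :
    l.foldl pvStepA (m, c) = (m, c) := by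
  induction l with
  | nil => simp
  | cons x l ih =>
    have hx : x = t := h x (by simp)
    subst hx
    simp only [List.foldl_cons, pvStepA, if_neg (by omega : ¬ x < m), if_neg (by omega : ¬ x = m)]
    exact ih (fun y hy => h y (by simp [hy]))

theorem foldl_stepA_const (l : List Int) (t m c : Int) (h : ∀ x ∈ l, x = t) (hne : l ≠ []) :
    l.foldl pvStepA (m, c) =
      if t < m then (t, (l.length : Int)) else if t = m then (m, c + l.length) else (m, c) := by
  cases l with
  | nil => exact absurd rfl hne
  | cons x l =>
    have hx : x = t := h x (by simp)
    subst hx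
    have hl : ∀ y ∈ l, y = x := fun y hy => h y (by simp [hy])
    simp only [List.foldl_cons, pvStepA]
    by_cases h1 : x < m
    · rw [if_pos h1, if_pos h1, foldl_stepA_eq l x 1 hl]
      simp; omega
    · rw [if_neg h1]
      by_cases h2 : x = m
      · subst h2
        rw [if_pos rfl, if_neg (lt_irrefl x), if_pos rfl, foldl_stepA_eq l x (c + 1) hl]
        simp; omega
      · rw [if_neg h2, if_neg h1, if_neg h2, foldl_stepA_gt l x m c (by omega) hl]

theorem pvStepB_some (length : Int) (o1 o2 : List Int) (m cnt c e : Int) :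
    pvStepB length o1 o2 (some m, cnt) (c, e) =
      if pvHits length o1 o2 c < m then (some (pvHits length o1 o2 c), e - c)
      else if pvHits length o1 o2 c = m then (some m, cnt + (e - c)) else (some m, cnt) := rfl

-- the main simulation: A's remaining per-height fold equals B's remaining per-block fold
theorem pvSim (h_ length : Int) (o1 o2 : List Int) :
    ∀ (ps : List Int) (c m cnt : Int), c ≤ h_ →
      ps.Pairwise (· < ·) →
      (∀ x ∈ ps, c < x ∧ x ≤ h_) →
      (∀ j, c < j → j ≤ h_ → pvCut o1 o2 j → j ∈ ps) →
      (((c :: ps).zip (ps ++ [h_ + 1])).foldl (pvStepB length o1 o2) (some m, cnt)) =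
        (some (((PySem.List.pyRange c (h_ + 1) 1).map (pvHits length o1 o2)).foldl pvStepA (m, cnt)).1,
         (((PySem.List.pyRange c (h_ + 1) 1).map (pvHits length o1 o2)).foldl pvStepA (m, cnt)).2) := by
  intro ps
  induction ps with
  | nil =>
    intro c m cnt hch hpw hmem hclo
    have hconst : ∀ x ∈ (PySem.List.pyRange c (h_ + 1) 1).map (pvHits length o1 o2),
        x = pvHits length o1 o2 c := by
      intro x hx
      rcases List.mem_map.mp hx with ⟨i, hi, rfl⟩
      rw [PySem.List.mem_pyRange_one] at hi
      exact pvHits_congr length o1 o2 c i hi.1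
        (fun j hj1 hj2 hcut => nomatch hclo j hj1 (by omega) hcut)
    have hlen : ((((PySem.List.pyRange c (h_ + 1) 1).map (pvHits length o1 o2)).length : Nat) : Int)
        = h_ + 1 - c := by
      simp [PySem.List.length_pyRange_one]; omega
    have hne : (PySem.List.pyRange c (h_ + 1) 1).map (pvHits length o1 o2) ≠ [] := by
      apply List.ne_nil_of_length_pos
      have : (0:Int) < h_ + 1 - c := by omega
      omega
    have hzip : ((c :: ([] : List Int)).zip (([] : List Int) ++ [h_ + 1])) = [(c, h_ + 1)] := by
      simp
    rw [hzip, List.foldl_cons, List.foldl_nil, pvStepB_some,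
      foldl_stepA_const _ (pvHits length o1 o2 c) m cnt hconst hne, hlen]
    split_ifs <;> rfl
  | cons nxt ps ih =>
    intro c m cnt hch hpw hmem hclo
    have hcn : c < nxt := (hmem nxt (by simp)).1
    have hnh : nxt ≤ h_ := (hmem nxt (by simp)).2
    have hps : ∀ x ∈ ps, nxt < x := fun x hx => (List.pairwise_cons.mp hpw).1 x hx
    have hsplit := PySem.List.pyRange_one_append c nxt (h_ + 1) (by omega) (by omega)
    have hconst : ∀ x ∈ (PySem.List.pyRange c nxt 1).map (pvHits length o1 o2),
        x = pvHits length o1 o2 c := by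
      intro x hx
      rcases List.mem_map.mp hx with ⟨i, hi, rfl⟩
      rw [PySem.List.mem_pyRange_one] at hi
      refine pvHits_congr length o1 o2 c i hi.1 (fun j hj1 hj2 hcut => ?_)
      have hj : j ∈ nxt :: ps := hclo j hj1 (by omega) hcut
      rcases List.mem_cons.mp hj with rfl | hj'
      · omega
      · have := hps j hj'; omega
    have hlen : ((((PySem.List.pyRange c nxt 1).map (pvHits length o1 o2)).length : Nat) : Int)
        = nxt - c := by
      simp [PySem.List.length_pyRange_one]; omega
    have hne : (PySem.List.pyRange c nxt 1).map (pvHits length o1 o2) ≠ [] := by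
      apply List.ne_nil_of_length_pos
      have : (0:Int) < nxt - c := by omega
      omega
    have hih := fun m' cnt' => ih nxt m' cnt' hnh (List.pairwise_cons.mp hpw).2
      (fun x hx => ⟨hps x hx, (hmem x (by simp [hx])).2⟩)
      (fun j hj1 hj2 hcut => by
        have hj : j ∈ nxt :: ps := hclo j (by omega) hj2 hcut
        rcases List.mem_cons.mp hj with rfl | hj'
        · omega
        · exact hj')
    rw [List.cons_append, List.zip_cons_cons, List.foldl_cons, pvStepB_some,
      hsplit, List.map_append, List.foldl_append,
      foldl_stepA_const _ (pvHits length o1 o2 c) m cnt hconst hne, hlen]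
    split_ifs <;> exact hih _ _


theorem solution_length_eq (n : Int) :
    (if PySem.Int.mod n 2 = 1 then PySem.Int.floordiv n 2 + 1 else PySem.Int.floordiv n 2) =
      PySem.Int.floordiv (n + 1) 2 := by
  have h1 := PySem.Int.floordiv_mul_add_mod n 2
  have h2 := PySem.Int.floordiv_mul_add_mod (n + 1) 2
  have h3 := PySem.Int.mod_nonneg n (b := 2) (by omega)
  have h4 := PySem.Int.mod_lt n (b := 2) (by omega)
  have h5 := PySem.Int.mod_nonneg (n + 1) (b := 2) (by omega)
  have h6 := PySem.Int.mod_lt (n + 1) (b := 2) (by omega)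
  split <;> omega

-- membership and distinctness through B's conditional set-building folds
theorem mem_foldl_add (l : List Int) (s : PySem.Set Int) (p : Int → Prop) [DecidablePred p]
    (f : Int → Int) (x : Int) :
    (x ∈ l.foldl (fun s v => if p v then PySem.Set.add s (f v) else s) s) ↔
      x ∈ s ∨ ∃ v ∈ l, p v ∧ x = f v := by
  induction l generalizing s with
  | nil => simp
  | cons a l ih =>
    simp only [List.foldl_cons]
    by_cases hp : p a
    · rw [if_pos hp, ih, PySem.Set.mem_add]
      constructor
      · rintro (⟨hs | rfl⟩ | ⟨v, hv, hpv, rfl⟩)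
        · exact Or.inl hs
        · exact Or.inr ⟨a, by simp, hp, rfl⟩
        · exact Or.inr ⟨v, by simp [hv], hpv, rfl⟩
      · rintro (hs | ⟨v, hv, hpv, rfl⟩)
        · exact Or.inl (Or.inl hs)
        · rcases List.mem_cons.mp hv with rfl | hv'
          · exact Or.inl (Or.inr rfl)
          · exact Or.inr ⟨v, hv', hpv, rfl⟩
    · rw [if_neg hp, ih]
      constructor
      · rintro (hs | ⟨v, hv, hpv, rfl⟩)
        · exact Or.inl hs
        · exact Or.inr ⟨v, by simp [hv], hpv, rfl⟩
      · rintro (hs | ⟨v, hv, hpv, rfl⟩)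
        · exact Or.inl hs
        · rcases List.mem_cons.mp hv with rfl | hv'
          · exact absurd hpv hp
          · exact Or.inr ⟨v, hv', hpv, rfl⟩

theorem nodup_foldl_add (l : List Int) (s : PySem.Set Int) (p : Int → Prop) [DecidablePred p]
    (f : Int → Int) (hs : s.Nodup) :
    (l.foldl (fun s v => if p v then PySem.Set.add s (f v) else s) s).Nodup := by
  induction l generalizing s with
  | nil => exact hs
  | cons a l ih =>
    simp only [List.foldl_cons]
    by_cases hp : p a
    · rw [if_pos hp]; exact ih _ (PySem.Set.nodup_add _ _ hs)
    · rw [if_neg hp]; exact ih _ hs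

-- A's hit count is below the 1e9 sentinel on every admitted input
theorem pvHits_lt (L : Int) (o1 o2 : List Int) (i : Int)
    (hbound : L + (o2.length : Int) < 1000000000) :
    pvHits L o1 o2 i < 1000000000 := by
  unfold pvHits
  have h1 : (PySem.List.bisectRight o2 i : Int) ≤ (o2.length : Int) := by
    exact_mod_cast bisectRight_le o2 i
  have h2 : (0 : Int) ≤ (PySem.List.bisectLeft o1 i : Int) := Int.natCast_nonneg _
  omega

theorem pvMain (n h_ : Int) (o1 o2 : List Int) (hh : 1 ≤ h_)
    (hbound : PySem.Int.floordiv (n + 1) 2 + (o2.length : Int) < 1000000000) :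
    solution n h_ o1 o2 = solution_alt n h_ o1 o2 := by
  simp only [solution, solution_alt]
  rw [solution_length_eq]
  set L := PySem.Int.floordiv (n + 1) 2 with hL
  have hbodyA : (fun (mc : Int × Int) (i : Int) =>
      pvStepA mc (L - (PySem.List.bisectLeft o1 i : Int) + (PySem.List.bisectRight o2 i : Int)))
      = fun mc i => pvStepA mc (pvHits L o1 o2 i) := rfl
  rw [hbodyA, ← List.foldl_map (g := pvStepA) (f := pvHits L o1 o2)]
  set cuts := List.foldl (fun s v => if 1 ≤ v ∧ v ≤ h_ then PySem.Set.add s v else s)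
      (List.foldl (fun s v => if 1 ≤ v + 1 ∧ v + 1 ≤ h_ then PySem.Set.add s (v + 1) else s)
        (PySem.Set.ofList [1]) o1) o2 with hcuts
  set pts := PySem.List.sorted cuts (fun x => x) with hpts
  have hF1 : pvHits L o1 o2 1 < 1000000000 := pvHits_lt L o1 o2 1 hbound
  have hmemc : ∀ x : Int, x ∈ cuts ↔ x = 1 ∨ (pvCut o1 o2 x ∧ 1 ≤ x ∧ x ≤ h_) := by
    intro x
    rw [hcuts, mem_foldl_add _ _ (fun v => 1 ≤ v ∧ v ≤ h_) (fun v => v),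
        mem_foldl_add _ _ (fun v => 1 ≤ v + 1 ∧ v + 1 ≤ h_) (fun v => v + 1),
        PySem.Set.mem_ofList]
    unfold pvCut
    constructor
    · rintro ((h1 | ⟨v, hv, hp, hxe⟩) | ⟨v, hv, hp, hxe⟩)
      · left; simpa using h1
      · obtain ⟨hp1, hp2⟩ := hp
        right; exact ⟨Or.inl ⟨v, hv, hxe⟩, by omega, by omega⟩
      · obtain ⟨hp1, hp2⟩ := hp
        right; exact ⟨Or.inr ⟨v, hv, hxe⟩, by omega, by omega⟩
    · rintro (rfl | ⟨(⟨v, hv, hxe⟩ | ⟨v, hv, hxe⟩), hb1, hb2⟩)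
      · left; left; simp
      · exact Or.inl (Or.inr ⟨v, hv, ⟨by omega, by omega⟩, hxe⟩)
      · exact Or.inr ⟨v, hv, ⟨by omega, by omega⟩, hxe⟩
  have hnodc : cuts.Nodup := by
    rw [hcuts]
    exact nodup_foldl_add _ _ _ _ (nodup_foldl_add _ _ _ _ (PySem.Set.nodup_ofList [1]))
  have hmempts : ∀ x : Int, x ∈ pts ↔ x = 1 ∨ (pvCut o1 o2 x ∧ 1 ≤ x ∧ x ≤ h_) := by
    intro x; rw [hpts, PySem.List.mem_sorted]; exact hmemc x
  have hnodpts : pts.Nodup := ((PySem.List.sorted_perm cuts (fun x => x) false).symm).nodup hnodc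
  have hpwlt : pts.Pairwise (· < ·) := by
    have h1 := PySem.List.sorted_pairwise cuts (fun x => x)
    exact (h1.and hnodpts).imp (fun h => lt_of_le_of_ne h.1 h.2)
  obtain ⟨rest, hrest⟩ : ∃ rest, pts = 1 :: rest := by
    cases hp : pts with
    | nil =>
      have h1m := (hmempts 1).mpr (Or.inl rfl)
      rw [hp] at h1m
      cases h1m
    | cons p rest =>
      have hp1 : 1 ≤ p := by
        have hpm : p ∈ pts := by rw [hp]; simp
        rcases (hmempts p).mp hpm with rfl | ⟨_, hb1, _⟩
        · exact le_refl 1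
        · exact hb1
      have h1m : (1 : Int) ∈ pts := (hmempts 1).mpr (Or.inl rfl)
      rw [hp] at h1m
      rcases List.mem_cons.mp h1m with heq | h1r
      · subst heq; exact ⟨rest, rfl⟩
      · have hpw := hpwlt
        rw [hp] at hpw
        have := (List.pairwise_cons.mp hpw).1 1 h1r
        omega
  rw [hrest]
  rcases rest with _ | ⟨r, rest'⟩
  · -- pts = [1]: a single constant block [1, h_]
    have hconst : ∀ x ∈ (PySem.List.pyRange 1 (h_ + 1) 1).map (pvHits L o1 o2),
        x = pvHits L o1 o2 1 := by
      intro x hx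
      rcases List.mem_map.mp hx with ⟨i, hi, rfl⟩
      rw [PySem.List.mem_pyRange_one] at hi
      refine pvHits_congr L o1 o2 1 i hi.1 (fun j hj1 hj2 hcut => ?_)
      have hj : j ∈ pts := (hmempts j).mpr (Or.inr ⟨hcut, by omega, by omega⟩)
      rw [hrest] at hj
      rcases List.mem_cons.mp hj with rfl | hj'
      · omega
      · cases hj'
    have hlen : ((((PySem.List.pyRange 1 (h_ + 1) 1).map (pvHits L o1 o2)).length : Nat) : Int)
        = h_ + 1 - 1 := by
      simp [PySem.List.length_pyRange_one]; omega
    have hne : (PySem.List.pyRange 1 (h_ + 1) 1).map (pvHits L o1 o2) ≠ [] := by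
      apply List.ne_nil_of_length_pos
      have : (0 : Int) < h_ + 1 - 1 := by omega
      omega
    have hzip : ((1 :: ([] : List Int)).zip (List.drop 1 (1 :: ([] : List Int)) ++ [h_ + 1]))
        = [(1, h_ + 1)] := by simp
    have hB : pvStepB L o1 o2 (none, 0) (1, h_ + 1) = (some (pvHits L o1 o2 1), h_ + 1 - 1) := rfl
    rw [hzip, List.foldl_cons, List.foldl_nil, hB,
      foldl_stepA_const _ (pvHits L o1 o2 1) 1000000000 0 hconst hne, if_pos hF1, hlen]
    simp
  · -- pts = 1 :: r :: rest'
    have h1r : 1 < r := by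
      have hpw := hpwlt
      rw [hrest] at hpw
      exact (List.pairwise_cons.mp hpw).1 r (by simp)
    have hrh : r ≤ h_ := by
      have hrm : r ∈ pts := by rw [hrest]; simp
      rcases (hmempts r).mp hrm with rfl | ⟨_, _, hb2⟩
      · omega
      · exact hb2
    have hpw2 : (r :: rest').Pairwise (· < ·) := by
      have hpw := hpwlt
      rw [hrest] at hpw
      exact (List.pairwise_cons.mp hpw).2
    have hrest' : ∀ x ∈ rest', r < x ∧ x ≤ h_ := by
      intro x hx
      refine ⟨(List.pairwise_cons.mp hpw2).1 x hx, ?_⟩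
      have hxm : x ∈ pts := by rw [hrest]; simp [hx]
      have hrx : r < x := (List.pairwise_cons.mp hpw2).1 x hx
      rcases (hmempts x).mp hxm with rfl | ⟨_, _, hb2⟩
      · omega
      · exact hb2
    have hclo : ∀ j, r < j → j ≤ h_ → pvCut o1 o2 j → j ∈ rest' := by
      intro j hj1 hj2 hcut
      have hj : j ∈ pts := (hmempts j).mpr (Or.inr ⟨hcut, by omega, hj2⟩)
      rw [hrest] at hj
      rcases List.mem_cons.mp hj with rfl | hj'
      · omega
      · rcases List.mem_cons.mp hj' with rfl | hj''
        · omega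
        · exact hj''
    have hconst : ∀ x ∈ (PySem.List.pyRange 1 r 1).map (pvHits L o1 o2),
        x = pvHits L o1 o2 1 := by
      intro x hx
      rcases List.mem_map.mp hx with ⟨i, hi, rfl⟩
      rw [PySem.List.mem_pyRange_one] at hi
      refine pvHits_congr L o1 o2 1 i hi.1 (fun j hj1 hj2 hcut => ?_)
      have hj : j ∈ pts := (hmempts j).mpr (Or.inr ⟨hcut, by omega, by omega⟩)
      rw [hrest] at hj
      rcases List.mem_cons.mp hj with rfl | hj'
      · omega
      · rcases List.mem_cons.mp hj' with rfl | hj''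
        · omega
        · have := (hrest' j hj'').1; omega
    have hlen : ((((PySem.List.pyRange 1 r 1).map (pvHits L o1 o2)).length : Nat) : Int)
        = r - 1 := by
      simp [PySem.List.length_pyRange_one]; omega
    have hne : (PySem.List.pyRange 1 r 1).map (pvHits L o1 o2) ≠ [] := by
      apply List.ne_nil_of_length_pos
      have : (0 : Int) < r - 1 := by omega
      omega
    have hzip : ((1 :: r :: rest').zip (List.drop 1 (1 :: r :: rest') ++ [h_ + 1]))
        = (1, r) :: ((r :: rest').zip (rest' ++ [h_ + 1])) := by simp
    have hB0 : pvStepB L o1 o2 (none, 0) (1, r) = (some (pvHits L o1 o2 1), r - 1) := rfl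
    have hsplit := PySem.List.pyRange_one_append 1 r (h_ + 1) (by omega) (by omega)
    have hsim := pvSim h_ L o1 o2 rest' r (pvHits L o1 o2 1) (r - 1) hrh
      (List.pairwise_cons.mp hpw2).2 hrest' hclo
    rw [hzip, List.foldl_cons, hB0, hsplit, List.map_append, List.foldl_append,
      foldl_stepA_const _ (pvHits L o1 o2 1) 1000000000 0 hconst hne, if_pos hF1, hlen, hsim]
    simp

-- ===== VERDICT (by name: the statement is the Claim_ definition above) =====
theorem solution_spec : Claim_equal_solution := by
  intro n h_ o1 o2 hdom hpre
  exact pvMain n h_ o1 o2 hpre.1 hpre.2
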